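-- pv_equiv track=rewrite | github.com/KSchachmatov/mealprep | src/mealprep/services/meal_service.py | _create_shopping_list
-- ===== SOURCE A (Python) =====
-- def _create_shopping_list(ingredients: list[str]) -> list[str]:
--     """Create a deduplicated shopping list from ingredients."""
--     ingredient_count = {}
--     for ing in ingredients:
--         ing_lower = ing.lower()
--         if ing_lower in ingredient_count:
--             ingredient_count[ing_lower] += 1
--         else:
--             ingredient_count[ing_lower] = 1
--
--     shopping_list = [
--         f"{ing} (x{count})" if count > 1 else ing
--         for ing, count in ingredient_count.items()
--     ]
--     return shopping_list
-- ===== SOURCE B (Python) =====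
-- def _create_shopping_list(ingredients: list[str]) -> list[str]:
--     """Create a deduplicated shopping list from ingredients."""
--     lowered = [ing.lower() for ing in ingredients]
--     shopping_list = []
--     while lowered:
--         name = lowered[0]
--         count = len(lowered)
--         lowered = [x for x in lowered if x != name]
--         count -= len(lowered)
--         shopping_list.append(f"{name} (x{count})" if count > 1 else name)
--     return shopping_list
-- ===== Notes on version B (the rewrite author's own statement) =====
-- stated objective: alternative
-- what changed: Replaces A's single-pass dict tally (conditional increment-or-insert, then formatting dict items) by a worklist loop that repeatedly peels off the head's whole equivalence class: it takes the first remaining lowercased name, filters out all its occurrences, and reads the count off the length difference -- no dictionary, set or counter at all.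
import Mathlib
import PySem

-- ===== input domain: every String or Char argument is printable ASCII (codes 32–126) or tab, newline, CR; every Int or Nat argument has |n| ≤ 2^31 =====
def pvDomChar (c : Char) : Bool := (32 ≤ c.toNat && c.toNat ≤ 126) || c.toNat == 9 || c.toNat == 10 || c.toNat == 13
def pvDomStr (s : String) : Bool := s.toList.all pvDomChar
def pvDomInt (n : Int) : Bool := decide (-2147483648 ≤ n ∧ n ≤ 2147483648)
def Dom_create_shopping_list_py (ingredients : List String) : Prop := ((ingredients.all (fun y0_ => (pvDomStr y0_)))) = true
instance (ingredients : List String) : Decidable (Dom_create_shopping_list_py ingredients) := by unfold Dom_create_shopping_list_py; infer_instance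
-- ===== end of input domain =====

-- B replaces A's dict tally by a worklist loop peeling off each head's equivalence class by filtering (alternative decomposition, not faster).


-- ===== PORT A =====
def create_shopping_list_py (ingredients : List String) : List String :=
  let ingredient_count : PySem.Dict String Int :=
    ingredients.foldl (fun d ing =>
      let ing_lower := PySem.Str.lower ing
      if d.contains ing_lower then d.modify ing_lower 0 (· + 1)
      else d.insert ing_lower 1) PySem.Dict.empty
  ingredient_count.items.map (fun p =>
    if p.2 > 1 then p.1 ++ " (x" ++ PySem.Int.toStr p.2 ++ ")" else p.1)

-- ===== PORT B =====
-- the 'while lowered:' loop of Source B: peel off the head's whole class by filtering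
def altLoop : List String → List String
  | [] => []
  | name :: rest0 =>
    let lowered := name :: rest0
    let lowered' := lowered.filter (fun x => x != name)
    let count : Int := (lowered.length : Int) - (lowered'.length : Int)
    (if count > 1 then name ++ " (x" ++ PySem.Int.toStr count ++ ")" else name) :: altLoop lowered'
termination_by l => l.length
decreasing_by
  simp
  exact List.length_filter_le _ _

def create_shopping_list_py_alt (ingredients : List String) : List String :=
  altLoop (ingredients.map PySem.Str.lower)

-- ===== PRECONDITION & SPEC =====
def Spec_create_shopping_list_py (ingredients : List String) (out : List String) : Prop := out = create_shopping_list_py_alt ingredients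
instance (ingredients : List String) (out : List String) : Decidable (Spec_create_shopping_list_py ingredients out) := by unfold Spec_create_shopping_list_py; infer_instance

-- ===== CLAIM (what is proved, stated in full; the proofs are below) =====
def Claim_equal_create_shopping_list_py : Prop := ∀ (ingredients : List String), Dom_create_shopping_list_py ingredients → Spec_create_shopping_list_py ingredients (create_shopping_list_py ingredients)

-- ===== LEMMAS AND PROOFS =====

def fmtCount (k : String) (c : Int) : String :=
  if c > 1 then k ++ " (x" ++ PySem.Int.toStr c ++ ")" else k

-- A's conditional increment-or-insert step is exactly Counter's modify step.
theorem step_eq_modify (d : PySem.Dict String Int) (x : String) :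
    (if d.contains x then d.modify x 0 (· + 1) else d.insert x 1) = d.modify x 0 (· + 1) := by
  by_cases h : d.contains x = true
  · simp [h]
  · simp only [Bool.not_eq_true] at h
    simp [h, PySem.Dict.modify, PySem.Dict.getD_of_not_contains _ _ h]

-- A's dict is Counter(lowered).
theorem dict_eq_counter (ingredients : List String) :
    ingredients.foldl (fun d ing =>
      let ing_lower := PySem.Str.lower ing
      if d.contains ing_lower then d.modify ing_lower 0 (· + 1)
      else d.insert ing_lower 1) PySem.Dict.empty
      = PySem.Dict.counter (ingredients.map PySem.Str.lower) := by
  rw [PySem.Dict.counter_eq_foldl, List.foldl_map]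
  exact List.foldl_ext _ _ _ (fun d x _ => step_eq_modify d (PySem.Str.lower x))

theorem mem_add_of_mem {α : Type} [BEq α] (s : PySem.Set α) (x a : α) (h : a ∈ s) :
    a ∈ PySem.Set.add s x := by
  unfold PySem.Set.add
  split
  · exact h
  · exact List.mem_append_left _ h

theorem add_of_mem {α : Type} [BEq α] [LawfulBEq α] (s : PySem.Set α) (a : α) (h : a ∈ s) :
    PySem.Set.add s a = s := by
  simp [PySem.Set.add, h]

theorem foldl_add_skip {α : Type} [BEq α] [LawfulBEq α] (a : α) (t : List α) :
    ∀ acc : PySem.Set α, a ∈ acc →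
      t.foldl PySem.Set.add acc = (t.filter (fun x => x != a)).foldl PySem.Set.add acc := by
  induction t with
  | nil => intro acc _; rfl
  | cons x t ih =>
    intro acc h
    by_cases hx : x = a
    · subst hx
      simp only [List.filter_cons, bne_self_eq_false, Bool.false_eq_true, ite_false,
        List.foldl_cons, add_of_mem acc x h]
      exact ih acc h
    · have hb : (x != a) = true := by simp [bne_iff_ne, hx]
      simp only [List.filter_cons, hb, ite_true, List.foldl_cons]
      exact ih _ (mem_add_of_mem acc x a h)

theorem foldl_add_cons {α : Type} [BEq α] (a : α) (t : List α)
    (h : ∀ x ∈ t, (x == a) = false) :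
    ∀ s : PySem.Set α, t.foldl PySem.Set.add (a :: s) = a :: t.foldl PySem.Set.add s := by
  induction t with
  | nil => intro s; rfl
  | cons x t ih =>
    intro s
    have hx : (x == a) = false := h x (List.mem_cons_self)
    have hstep : PySem.Set.add (a :: s) x = a :: PySem.Set.add s x := by
      have hc : PySem.Set.contains (a :: s) x = PySem.Set.contains s x := by
        simp [PySem.Set.contains, List.contains_cons, hx]
      unfold PySem.Set.add
      rw [hc]
      split
      · rfl
      · rfl
    rw [List.foldl_cons, hstep, ih (fun y hy => h y (List.mem_cons_of_mem _ hy)), List.foldl_cons]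

theorem ofList_cons {α : Type} [BEq α] [LawfulBEq α] (a : α) (t : List α) :
    PySem.Set.ofList (a :: t) = a :: PySem.Set.ofList (t.filter (fun x => x != a)) := by
  unfold PySem.Set.ofList
  rw [List.foldl_cons]
  have h1 : PySem.Set.add PySem.Set.empty a = [a] := rfl
  rw [h1, foldl_add_skip a t [a] (List.mem_singleton_self a)]
  exact foldl_add_cons a (t.filter (fun x => x != a))
    (fun x hx => by
      have := List.of_mem_filter hx
      simpa [bne] using this) []

theorem count_filter_ne {α : Type} [BEq α] [LawfulBEq α] [DecidableEq α] (k a : α) (h : k ≠ a) (t : List α) :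
    List.count k (t.filter (fun x => x != a)) = List.count k t := by
  induction t with
  | nil => rfl
  | cons x t ih =>
    by_cases hx : x = a
    · subst hx
      have ha : x ≠ k := fun e => h e.symm
      simp [ih, List.count_cons_of_ne ha]
    · have hb : (x != a) = true := by simp [bne_iff_ne, hx]
      simp [hb, List.count_cons, ih]

theorem filter_length_count (name : String) (t : List String) :
    (t.filter (fun x => x != name)).length + List.count name t = t.length := by
  induction t with
  | nil => rfl
  | cons x t ih =>
    by_cases hx : x = name
    · subst hx
      simp only [List.filter_cons, bne_self_eq_false, Bool.false_eq_true, ite_false,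
        List.count_cons_self, List.length_cons]
      omega
    · have hb : (x != name) = true := by simp [bne_iff_ne, hx]
      simp only [List.filter_cons, hb, ite_true, List.length_cons,
        List.count_cons_of_ne hx]
      omega

theorem altLoop_eq (l : List String) :
    altLoop l = (PySem.Set.ofList l).map (fun k => fmtCount k (List.count k l : Int)) := by
  match l with
  | [] =>
    simp [altLoop.eq_def, PySem.Set.ofList]
  | name :: t =>
    have hfilter : (name :: t).filter (fun x => x != name) = t.filter (fun x => x != name) := by
      simp
    have hcount : ((name :: t).length : Int) - (((t.filter (fun x => x != name)).length : Int))
        = (List.count name (name :: t) : Int) := by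
      have := filter_length_count name t
      simp only [List.length_cons, List.count_cons_self]
      omega
    have IH := altLoop_eq (t.filter (fun x => x != name))
    conv_lhs => rw [altLoop.eq_def]
    rw [ofList_cons]
    simp only [hfilter, List.map_cons]
    rw [hcount]
    refine congrArg₂ List.cons rfl ?_
    rw [IH]
    apply List.map_congr_left
    intro k hk
    have hkf : k ∈ t.filter (fun x => x != name) := by
      simpa [PySem.Set.mem_ofList] using hk
    have hkne : k ≠ name := by
      simpa [bne_iff_ne] using List.of_mem_filter hkf
    rw [count_filter_ne k name hkne t,
      List.count_cons_of_ne (fun e => hkne e.symm : name ≠ k)]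
termination_by l.length
decreasing_by
  simp
  exact List.length_filter_le _ _

-- ===== VERDICT (by name: the statement is the Claim_ definition above) =====
theorem create_shopping_list_py_spec : Claim_equal_create_shopping_list_py := by
  intro ingredients _
  unfold Spec_create_shopping_list_py create_shopping_list_py create_shopping_list_py_alt
  rw [dict_eq_counter, altLoop_eq]
  simp only [PySem.Dict.items_counter, List.map_map]
  exact List.map_congr_left (fun k _ => rfl)
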